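-- pv_equiv track=rewrite | github.com/ktawiah/CodePath-DSA | Unit-2/Session-2/Standard_V1/excursions.py | is_profitable
-- ===== SOURCE A (Python) =====
-- def is_profitable(excursion_counts, start=0, count=0):
--     if len(excursion_counts) < 1:
--         return -1
--
--     if start == len(excursion_counts):
--         return count if count > 0 else -1
--
--     if excursion_counts[start] >= len(excursion_counts):
--         count += 1
--
--     return is_profitable(excursion_counts, start + 1, count)
-- ===== SOURCE B (Python) =====
-- def is_profitable(excursion_counts, start=0, count=0):
--     n = len(excursion_counts)
--     if n < 1:
--         return -1
--     for i in range(start, n):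
--         if excursion_counts[i] >= n:
--             count += 1
--     return count if count > 0 else -1
-- ===== Notes on version B (the rewrite author's own statement) =====
-- stated objective: simpler
-- what changed: Replaces the tail recursion (one call frame per element, threading start/count through the signature) with a single explicit for-loop over range(start, n) accumulating count.
import Mathlib
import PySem

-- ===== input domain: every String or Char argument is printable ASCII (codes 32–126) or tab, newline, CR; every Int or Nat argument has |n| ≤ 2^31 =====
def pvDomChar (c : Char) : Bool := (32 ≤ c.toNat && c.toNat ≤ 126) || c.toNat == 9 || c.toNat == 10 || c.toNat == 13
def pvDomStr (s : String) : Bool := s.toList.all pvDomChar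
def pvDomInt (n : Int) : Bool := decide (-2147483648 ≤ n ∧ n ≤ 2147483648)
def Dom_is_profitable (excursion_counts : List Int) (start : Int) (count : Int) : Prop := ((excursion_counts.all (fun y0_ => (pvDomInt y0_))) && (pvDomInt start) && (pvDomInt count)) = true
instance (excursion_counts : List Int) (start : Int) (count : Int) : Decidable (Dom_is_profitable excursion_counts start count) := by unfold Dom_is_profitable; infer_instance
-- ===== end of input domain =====

-- B replaces A's tail recursion by a single explicit for-loop accumulating count (simpler, O(1) space).

-- ===== PORT A =====
-- Literal port of A's recursion; where Python would raise IndexError (pyGet? = none,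
-- excluded by Pre_) the port returns 0.
def is_profitable (excursion_counts : List Int) (start : Int) (count : Int) : Int :=
  if excursion_counts.length < 1 then -1
  else if start = (excursion_counts.length : Int) then (if count > 0 then count else -1)
  else
    match h : PySem.List.pyGet? excursion_counts start with
    | none => 0
    | some v =>
        is_profitable excursion_counts (start + 1)
          (if v ≥ (excursion_counts.length : Int) then count + 1 else count)
termination_by ((excursion_counts.length : Int) + 1 - start).toNat
decreasing_by
  have hlt : start < (excursion_counts.length : Int) := by
    by_contra hge
    have hnone : PySem.List.pyGet? excursion_counts start = none := by
      rw [PySem.List.pyGet?_eq_none_iff]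
      intro hin
      exact absurd hin.2 (by omega)
    simp [hnone] at h
  omega

-- ===== PORT B =====
def is_profitable_alt (excursion_counts : List Int) (start : Int) (count : Int) : Int :=
  let n : Int := excursion_counts.length
  if n < 1 then -1
  else
    let c := (PySem.List.pyRange start n 1).foldl
      (fun c i =>
        match PySem.List.pyGet? excursion_counts i with
        | none => c   -- IndexError in Python; never hit inside Pre_
        | some v => if v ≥ n then c + 1 else c) count
    if c > 0 then c else -1

-- ===== PRECONDITION & SPEC =====
-- Pre_ excludes exactly the inputs where A raises IndexError: a non-empty list with
-- start outside [-len, len] (A indexes before its base case there).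
def Pre_is_profitable (excursion_counts : List Int) (start : Int) (count : Int) : Prop :=
  excursion_counts = [] ∨
    (-(excursion_counts.length : Int) ≤ start ∧ start ≤ (excursion_counts.length : Int))
instance (excursion_counts : List Int) (start : Int) (count : Int) : Decidable (Pre_is_profitable excursion_counts start count) := by unfold Pre_is_profitable; infer_instance
def pvWitness_is_profitable : List Int × Int × Int := ([3, 1, 2], 0, 0)

def Spec_is_profitable (excursion_counts : List Int) (start : Int) (count : Int) (out : Int) : Prop := out = is_profitable_alt excursion_counts start count
instance (excursion_counts : List Int) (start : Int) (count : Int) (out : Int) : Decidable (Spec_is_profitable excursion_counts start count out) := by unfold Spec_is_profitable; infer_instance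

-- ===== CLAIM (what is proved, stated in full; the proofs are below) =====
def Claim_equal_is_profitable : Prop := ∀ (excursion_counts : List Int) (start : Int) (count : Int), Dom_is_profitable excursion_counts start count → Pre_is_profitable excursion_counts start count → Spec_is_profitable excursion_counts start count (is_profitable excursion_counts start count)
-- ===== VERDICT is below; first the main lemma =====
-- A's recursion equals B's fold, by induction on the distance from start to the length.
theorem is_profitable_eq_alt (excursion_counts : List Int) (start count : Int)
    (hne : excursion_counts ≠ [])
    (hlo : -(excursion_counts.length : Int) ≤ start)
    (hhi : start ≤ (excursion_counts.length : Int)) :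
    is_profitable excursion_counts start count
      = is_profitable_alt excursion_counts start count := by
  have hlen : 0 < excursion_counts.length := List.length_pos_iff.mpr hne
  obtain ⟨k, hk⟩ : ∃ k : Nat, (excursion_counts.length : Int) - start = k :=
    ⟨((excursion_counts.length : Int) - start).toNat, by omega⟩
  induction k generalizing start count with
  | zero =>
      have hs : start = (excursion_counts.length : Int) := by omega
      subst hs
      rw [is_profitable, if_neg (by omega), if_pos rfl]
      simp only [is_profitable_alt]
      rw [PySem.List.pyRange_one_eq_nil le_rfl]
      simp only [List.foldl_nil,
        if_neg (show ¬ ((excursion_counts.length : Int) < 1) by omega)]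
  | succ k ih =>
      have hs : start < (excursion_counts.length : Int) := by omega
      rw [is_profitable, if_neg (by omega), if_neg (by omega)]
      split
      · next hnone =>
          rw [PySem.List.pyGet?_eq_none_iff] at hnone
          exact absurd ⟨by omega, by omega⟩ hnone
      · next v hsome =>
          rw [ih (start + 1) _ (by omega) (by omega) (by push_cast at hk ⊢; omega)]
          simp only [is_profitable_alt]
          rw [PySem.List.pyRange_one_cons hs]
          simp only [List.foldl_cons, hsome, if_neg (show ¬ ((excursion_counts.length : Int) < 1) by omega)]

theorem is_profitable_spec : Claim_equal_is_profitable := by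
  intro xs start count _ hpre
  unfold Spec_is_profitable
  rcases hpre with hnil | ⟨hlo, hhi⟩
  · subst hnil
    rw [is_profitable, is_profitable_alt]
    simp
  · by_cases hne : xs = []
    · subst hne
      rw [is_profitable, is_profitable_alt]
      simp
    · exact (is_profitable_eq_alt xs start count hne hlo hhi)
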